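-- pv_equiv track=rewrite | github.com/RiturajSingh2004/peptide-mz-calculator | src/peptide_mz_calculator/modifications.py | formula_to_string
-- ===== SOURCE A (Python) =====
-- from typing import Dict, List, Any, Optional, Union
--
-- def formula_to_string(formula: Dict[str, int]) -> str:
--     """
--     Convert a formula dictionary to a string.
--
--     Args:
--         formula: Dictionary of elements and counts
--
--     Returns:
--         Formula string (e.g., "C2H3NO")
--     """
--     if not formula:
--         return ""
--
--     # Sort elements in a standard order
--     standard_order = ["C", "H", "N", "O", "P", "S"]
--
--     # Sort first by standard order, then alphabetically for other elements
--     formula_items = sorted(formula.items(), key=lambda x: (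
--         standard_order.index(x[0]) if x[0] in standard_order else 100,
--         x[0]
--     ))
--
--     # Build the formula string
--     formula_str = ""
--     for element, count in formula_items:
--         if count == 1:
--             formula_str += element
--         elif count > 1:
--             formula_str += f"{element}{count}"
--
--     return formula_str
-- ===== SOURCE B (Python) =====
-- def formula_to_string(formula):
--     """Two-phase build: fixed CHNOPS order first, then remaining elements alphabetically."""
--     standard = ["C", "H", "N", "O", "P", "S"]
--     parts = []
--     for element in standard:
--         if element in formula:
--             count = formula[element]
--             if count == 1:
--                 parts.append(element)
--             elif count > 1:
--                 parts.append(f"{element}{count}")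
--     for element in sorted(k for k in formula if k not in standard):
--         count = formula[element]
--         if count == 1:
--             parts.append(element)
--         elif count > 1:
--             parts.append(f"{element}{count}")
--     return "".join(parts)
-- ===== Notes on version B (the rewrite author's own statement) =====
-- stated objective: alternative
-- what changed: Replaces A's single sorted() call with a composite tuple key by two plain phases: a scan of the fixed CHNOPS list with dict lookups, then an alphabetical sort of only the non-standard keys, appending formatted parts and joining once.
import Mathlib
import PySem

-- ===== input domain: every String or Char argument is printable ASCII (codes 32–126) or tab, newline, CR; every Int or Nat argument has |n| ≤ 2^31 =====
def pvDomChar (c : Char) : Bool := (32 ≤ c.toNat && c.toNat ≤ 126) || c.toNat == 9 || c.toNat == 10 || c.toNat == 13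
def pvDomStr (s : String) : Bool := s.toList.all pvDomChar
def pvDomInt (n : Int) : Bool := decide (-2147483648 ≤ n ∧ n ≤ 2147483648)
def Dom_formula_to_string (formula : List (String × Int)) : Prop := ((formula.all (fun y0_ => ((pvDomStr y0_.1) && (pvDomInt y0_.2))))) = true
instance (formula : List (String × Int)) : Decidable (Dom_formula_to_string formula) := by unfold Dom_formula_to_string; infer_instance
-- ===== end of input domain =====

-- B re-decomposes A's single sorted() over a tuple key into two plain phases (fixed CHNOPS scan, then the
-- alphabetically sorted non-standard keys); same return value, objective: alternative decomposition.

-- ===== PORT A =====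
def pvStd : List String := ["C", "H", "N", "O", "P", "S"]

def formula_to_string (formula : List (String × Int)) : String :=
  if formula = [] then ""
  else
    -- sorted(formula.items(), key=lambda x: (standard_order.index(x[0]) if x[0] in standard_order else 100, x[0]))
    let items := PySem.List.sorted2 formula
      (fun x => if pvStd.contains x.1 then (((PySem.List.index? pvStd x.1).getD 0 : Nat) : Int) else 100)
      (fun x => x.1)
    items.foldl (fun s p =>
      if p.2 == 1 then s ++ p.1
      else if p.2 > 1 then s ++ p.1 ++ PySem.Int.toStr p.2
      else s) ""

-- ===== PORT B =====
-- B's own copy of the fixed standard order (Source B defines its own list)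
def pvStdB : List String := ["C", "H", "N", "O", "P", "S"]

def formula_to_string_alt (formula : List (String × Int)) : String :=
  let d : PySem.Dict String Int := PySem.Dict.mk formula
  -- phase 1: fixed standard order  (match none => unchanged ports 'if element in formula')
  let parts1 := pvStdB.foldl (fun parts e =>
      match d.get? e with
      | some c => if c == 1 then parts ++ [e]
                  else if c > 1 then parts ++ [e ++ PySem.Int.toStr c] else parts
      | none => parts) []
  -- phase 2: remaining keys, alphabetically
  let others := PySem.List.sorted
    ((formula.map Prod.fst).filter (fun k => !pvStdB.contains k)) (fun k => k)
  let parts := others.foldl (fun parts e =>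
      match d.get? e with
      | some c => if c == 1 then parts ++ [e]
                  else if c > 1 then parts ++ [e ++ PySem.Int.toStr c] else parts
      | none => parts) parts1
  PySem.Str.join "" parts

-- ===== PRECONDITION & SPEC =====
-- The input stands for a Python dict, whose keys are necessarily distinct; Pre_ excludes association
-- lists with duplicate keys, which no dict argument of A can produce.
def Pre_formula_to_string (formula : List (String × Int)) : Prop := (formula.map Prod.fst).Nodup
instance (formula : List (String × Int)) : Decidable (Pre_formula_to_string formula) := by unfold Pre_formula_to_string; infer_instance
def pvWitness_formula_to_string : (List (String × Int)) := [("H", 2), ("C", 1), ("Na", 3), ("O", 0)]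

def Spec_formula_to_string (formula : List (String × Int)) (out : String) : Prop := out = formula_to_string_alt formula
instance (formula : List (String × Int)) (out : String) : Decidable (Spec_formula_to_string formula out) := by unfold Spec_formula_to_string; infer_instance

-- ===== CLAIM (what is proved, stated in full; the proofs are below) =====
def Claim_equal_formula_to_string : Prop := ∀ (formula : List (String × Int)), Dom_formula_to_string formula → Pre_formula_to_string formula → Spec_formula_to_string formula (formula_to_string formula)

-- ===== LEMMAS AND PROOFS =====

-- proof-side helpers
def pvIdx (e : String) : Int := if pvStd.contains e then (((PySem.List.index? pvStd e).getD 0 : Nat) : Int) else 100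
def pvKey (p : String × Int) : Lex (Int × String) := toLex (pvIdx p.1, p.1)
def pvG (p : String × Int) : String := if p.2 == 1 then p.1 else if p.2 > 1 then p.1 ++ PySem.Int.toStr p.2 else ""
def pvCat : List (String × Int) → String
  | [] => ""
  | p :: t => pvG p ++ pvCat t
def pvCatS : List String → String
  | [] => ""
  | s :: t => s ++ pvCatS t
def pvL (d : PySem.Dict String Int) (l : List String) : List (String × Int) :=
  l.filterMap (fun e => (d.get? e).map (fun c => (e, c)))
def pvF? (e : String) (c : Int) : Option String :=
  if c == 1 then some e else if c > 1 then some (e ++ PySem.Int.toStr c) else none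

lemma sorted2_eq_sorted_toLex {α κ₁ κ₂ : Type} [LinearOrder κ₁] [LinearOrder κ₂]
    (xs : List α) (k1 : α → κ₁) (k2 : α → κ₂) :
    PySem.List.sorted2 xs k1 k2 = PySem.List.sorted xs (fun x => toLex (k1 x, k2 x)) := by
  have hb : (fun (a b : α) => (decide (k1 a < k1 b) || (!decide (k1 b < k1 a) && decide (k2 a < k2 b))))
      = (fun (a b : α) => decide ((toLex (k1 a, k2 a) : Lex (κ₁ × κ₂)) < toLex (k1 b, k2 b))) := by
    funext a b
    by_cases h1 : k1 a < k1 b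
    · simp [h1, Prod.Lex.lt_iff]
    · by_cases h2 : k1 b < k1 a
      · simp [h1, h2, Prod.Lex.lt_iff]
        intro h; exact absurd (h ▸ h2) (lt_irrefl _)
      · have he : k1 a = k1 b := le_antisymm (not_lt.1 h2) (not_lt.1 h1)
        simp [h1, h2, Prod.Lex.lt_iff, he]
  simp only [PySem.List.sorted2, PySem.List.sorted, if_neg (by decide : ¬(false = true))]
  rw [hb]

lemma pvA_fold (items : List (String × Int)) (s : String) :
    items.foldl (fun s p =>
      if p.2 == 1 then s ++ p.1
      else if p.2 > 1 then s ++ p.1 ++ PySem.Int.toStr p.2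
      else s) s = s ++ pvCat items := by
  induction items generalizing s with
  | nil => simp [pvCat]
  | cons p t ih =>
    simp only [List.foldl_cons, ih, pvCat, pvG]
    split_ifs <;> simp [String.append_assoc]

lemma pvB_fold (d : PySem.Dict String Int) (l : List String) (parts : List String) :
    l.foldl (fun parts e =>
      match d.get? e with
      | some c => if c == 1 then parts ++ [e]
                  else if c > 1 then parts ++ [e ++ PySem.Int.toStr c] else parts
      | none => parts) parts = parts ++ l.filterMap (fun e => (d.get? e).bind (pvF? e)) := by
  induction l generalizing parts with
  | nil => simp
  | cons e t ih =>
    simp only [List.foldl_cons, List.filterMap_cons]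
    cases h : d.get? e with
    | none =>
      simp only [h, Option.bind_none]
      rw [ih]
    | some c =>
      simp only [h, Option.bind_some]
      by_cases h1 : c == 1
      · have hf : pvF? e c = some e := by simp [pvF?, h1]
        simp only [hf, if_pos h1]
        rw [ih]; simp only [List.append_assoc, List.singleton_append]
      · by_cases h2 : c > 1
        · have hf : pvF? e c = some (e ++ PySem.Int.toStr c) := by simp [pvF?, h1, h2]
          simp only [hf, if_neg h1, if_pos h2]
          rw [ih]; simp only [List.append_assoc, List.singleton_append]
        · have hf : pvF? e c = none := by simp [pvF?, h1, h2]
          simp only [hf, if_neg h1, if_neg h2]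
          rw [ih]

lemma pvJoin_empty (parts : List String) : PySem.Str.join "" parts = pvCatS parts := by
  induction parts with
  | nil => simp [PySem.Str.join, PySem.Chars.join_nil, pvCatS]
  | cons s t ih =>
    cases t with
    | nil =>
      show PySem.Str.join "" [s] = s ++ pvCatS []
      simp [PySem.Str.join, PySem.Chars.join_singleton, pvCatS]
    | cons b r =>
      have h1 : PySem.Str.join "" (s :: b :: r) = s ++ PySem.Str.join "" (b :: r) := by
        simp [PySem.Str.join, PySem.Chars.join_cons_cons]
      rw [h1, ih]
      rfl

lemma pvCatS_append (l1 l2 : List String) : pvCatS (l1 ++ l2) = pvCatS l1 ++ pvCatS l2 := by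
  induction l1 with
  | nil => simp [pvCatS]
  | cons s t ih => simp [pvCatS, ih, String.append_assoc]

lemma pvCat_append (l1 l2 : List (String × Int)) : pvCat (l1 ++ l2) = pvCat l1 ++ pvCat l2 := by
  induction l1 with
  | nil => simp [pvCat]
  | cons p t ih => simp [pvCat, ih, String.append_assoc]

lemma pvCatS_filterMap (d : PySem.Dict String Int) (l : List String) :
    pvCatS (l.filterMap (fun e => (d.get? e).bind (pvF? e))) = pvCat (pvL d l) := by
  induction l with
  | nil => simp [pvL, pvCatS, pvCat]
  | cons e t ih =>
    simp only [pvL, List.filterMap_cons] at *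
    cases h : d.get? e with
    | none => simp only [h, Option.bind_none, Option.map_none]; exact ih
    | some c =>
      simp only [h, Option.bind_some, Option.map_some]
      by_cases h1 : c == 1
      · have hf : pvF? e c = some e := by simp [pvF?, h1]
        simp only [hf]
        show e ++ pvCatS _ = pvG (e, c) ++ pvCat _
        rw [ih]
        have : pvG (e, c) = e := by simp [pvG, h1]
        rw [this]
      · by_cases h2 : c > 1
        · have hf : pvF? e c = some (e ++ PySem.Int.toStr c) := by simp [pvF?, h1, h2]
          simp only [hf]
          show (e ++ PySem.Int.toStr c) ++ pvCatS _ = pvG (e, c) ++ pvCat _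
          rw [ih]
          have : pvG (e, c) = e ++ PySem.Int.toStr c := by simp [pvG, h1, h2]
          rw [this]
        · have hf : pvF? e c = none := by simp [pvF?, h1, h2]
          simp only [hf, Option.bind_none]
          rw [ih]
          show pvCat _ = pvG (e, c) ++ pvCat _
          have : pvG (e, c) = "" := by simp [pvG, h1, h2]
          rw [this]
          simp

lemma pv_get?_iff (formula : List (String × Int)) (hn : (formula.map Prod.fst).Nodup)
    (k : String) (v : Int) :
    (PySem.Dict.mk formula).get? k = some v ↔ (k, v) ∈ formula :=
  PySem.Dict.get?_eq_some_iff_mem_items ⟨formula⟩ k v hn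

lemma pvL_nodup (d : PySem.Dict String Int) (l : List String) (hl : l.Nodup) :
    (pvL d l).Nodup := by
  refine List.Nodup.filterMap ?_ hl
  intro a a' b hb hb'
  rw [Option.mem_def] at hb hb'
  cases h : d.get? a <;> rw [h] at hb <;> simp at hb
  cases h' : d.get? a' <;> rw [h'] at hb' <;> simp at hb'
  subst hb
  exact congrArg Prod.fst hb'.symm

lemma pvL_mem (formula : List (String × Int)) (hn : (formula.map Prod.fst).Nodup)
    (l : List String) (p : String × Int) :
    p ∈ pvL (PySem.Dict.mk formula) l ↔ p.1 ∈ l ∧ p ∈ formula := by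
  simp only [pvL, List.mem_filterMap]
  constructor
  · rintro ⟨a, ha, hm⟩
    cases h : (PySem.Dict.mk formula).get? a <;> rw [h] at hm <;> simp at hm
    subst hm
    exact ⟨ha, (pv_get?_iff formula hn _ _).1 h⟩
  · rintro ⟨h1, h2⟩
    refine ⟨p.1, h1, ?_⟩
    have := (pv_get?_iff formula hn p.1 p.2).2 (by simpa using h2)
    rw [this]; rfl

lemma pvL_perm_filter (formula : List (String × Int)) (hn : (formula.map Prod.fst).Nodup)
    (l : List String) (hl : l.Nodup) (q : String → Bool)
    (h : ∀ k ∈ formula.map Prod.fst, (k ∈ l ↔ q k = true)) :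
    (pvL (PySem.Dict.mk formula) l).Perm (formula.filter (fun p => q p.1)) := by
  rw [List.perm_ext_iff_of_nodup (pvL_nodup _ _ hl) (((hn.of_map).filter _))]
  intro p
  rw [pvL_mem formula hn l p, List.mem_filter]
  constructor
  · rintro ⟨h1, h2⟩
    exact ⟨h2, ((h p.1 (List.mem_map_of_mem h2)).1 h1)⟩
  · rintro ⟨h2, hq⟩
    exact ⟨(h p.1 (List.mem_map_of_mem h2)).2 hq, h2⟩

lemma pv_perm (formula : List (String × Int)) (hn : (formula.map Prod.fst).Nodup) :
    (pvL (PySem.Dict.mk formula) pvStd ++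
     pvL (PySem.Dict.mk formula)
       (PySem.List.sorted ((formula.map Prod.fst).filter (fun k => !pvStd.contains k)) (fun k => k))).Perm
      formula := by
  have hfn : ((formula.map Prod.fst).filter (fun k => !pvStd.contains k)).Nodup := hn.filter _
  have hsp := PySem.List.sorted_perm ((formula.map Prod.fst).filter (fun k => !pvStd.contains k)) (fun k => k) false
  have h1 := pvL_perm_filter formula hn pvStd (by decide) (fun k => pvStd.contains k)
    (fun k _ => by simp)
  have h2 := pvL_perm_filter formula hn (PySem.List.sorted ((formula.map Prod.fst).filter (fun k => !pvStd.contains k)) (fun k => k)) (hsp.symm.nodup hfn) (fun k => !pvStd.contains k)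
    (fun k hk => by
      rw [hsp.mem_iff, List.mem_filter]
      exact ⟨fun h => h.2, fun h => ⟨hk, h⟩⟩)
  exact (h1.append h2).trans (List.filter_append_perm (fun p => pvStd.contains p.1) formula)

lemma pv_pairwise (formula : List (String × Int)) (hn : (formula.map Prod.fst).Nodup) :
    (pvL (PySem.Dict.mk formula) pvStd ++
     pvL (PySem.Dict.mk formula)
       (PySem.List.sorted ((formula.map Prod.fst).filter (fun k => !pvStd.contains k)) (fun k => k))).Pairwise
      (fun a b => pvKey a < pvKey b) := by
  have fact1 : ∀ e ∈ pvStd, pvIdx e < 100 := by decide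
  have fact2 : ∀ e : String, pvStd.contains e = false → pvIdx e = 100 := by
    intro e he; unfold pvIdx; rw [if_neg (by simpa using he)]
  set ks := PySem.List.sorted ((formula.map Prod.fst).filter (fun k => !pvStd.contains k)) (fun k => k) with hks
  have hfn : ((formula.map Prod.fst).filter (fun k => !pvStd.contains k)).Nodup := hn.filter _
  have hsp := PySem.List.sorted_perm ((formula.map Prod.fst).filter (fun k => !pvStd.contains k)) (fun k => k) false
  have hksmem : ∀ e ∈ ks, pvStd.contains e = false := by
    intro e he
    have := (hsp.mem_iff.1 he)
    rw [List.mem_filter] at this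
    simpa using this.2
  have hkslt : ks.Pairwise (fun a b => a < b) := by
    have hle : ks.Pairwise (fun a b => a ≤ b) := PySem.List.sorted_pairwise _ _
    have hne : ks.Nodup := hsp.symm.nodup hfn
    exact (hle.and hne).imp (fun h => lt_of_le_of_ne h.1 h.2)
  rw [List.pairwise_append]
  refine ⟨?_, ?_, ?_⟩
  · rw [pvL, List.pairwise_filterMap]
    have hstd : pvStd.Pairwise (fun e1 e2 => pvIdx e1 < pvIdx e2) := by decide
    refine hstd.imp_of_mem ?_
    intro e1 e2 _ _ hlt b hb b' hb'
    cases h : (PySem.Dict.mk formula).get? e1 <;> rw [h] at hb <;> simp at hb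
    cases h' : (PySem.Dict.mk formula).get? e2 <;> rw [h'] at hb' <;> simp at hb'
    subst hb; subst hb'
    rw [pvKey, pvKey, Prod.Lex.lt_iff]
    exact Or.inl hlt
  · rw [pvL, List.pairwise_filterMap]
    refine hkslt.imp_of_mem ?_
    intro e1 e2 he1 he2 hlt b hb b' hb'
    cases h : (PySem.Dict.mk formula).get? e1 <;> rw [h] at hb <;> simp at hb
    cases h' : (PySem.Dict.mk formula).get? e2 <;> rw [h'] at hb' <;> simp at hb'
    subst hb; subst hb'
    rw [pvKey, pvKey, Prod.Lex.lt_iff]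
    right
    exact ⟨by simp [fact2 e1 (hksmem e1 he1), fact2 e2 (hksmem e2 he2)], hlt⟩
  · intro a ha b hb
    rw [pvL, List.mem_filterMap] at ha hb
    obtain ⟨e1, he1, hm1⟩ := ha
    obtain ⟨e2, he2, hm2⟩ := hb
    cases h : (PySem.Dict.mk formula).get? e1 <;> rw [h] at hm1 <;> simp at hm1
    cases h' : (PySem.Dict.mk formula).get? e2 <;> rw [h'] at hm2 <;> simp at hm2
    subst hm1; subst hm2
    rw [pvKey, pvKey, Prod.Lex.lt_iff]
    left
    calc pvIdx e1 < 100 := fact1 e1 he1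
      _ = pvIdx e2 := (fact2 e2 (hksmem e2 he2)).symm

-- ===== VERDICT (by name: the statement is the Claim_ definition above) =====
theorem formula_to_string_spec : Claim_equal_formula_to_string := by
  intro formula _hdom hpre
  unfold Spec_formula_to_string
  by_cases hempty : formula = []
  · subst hempty; rfl
  · simp only [formula_to_string, formula_to_string_alt, if_neg hempty]
    rw [(rfl : pvStdB = pvStd)]
    rw [pvA_fold, pvB_fold, pvB_fold, pvJoin_empty]
    rw [sorted2_eq_sorted_toLex]
    have hkey : (fun x : String × Int =>
        toLex ((if pvStd.contains x.1 then (((PySem.List.index? pvStd x.1).getD 0 : Nat) : Int) else 100), x.1))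
        = pvKey := rfl
    rw [hkey]
    rw [PySem.List.sorted_eq_of_perm_of_pairwise_lt formula
      (pvL (PySem.Dict.mk formula) pvStd ++
        pvL (PySem.Dict.mk formula)
          (PySem.List.sorted ((formula.map Prod.fst).filter (fun k => !pvStd.contains k)) (fun k => k)))
      pvKey (pv_perm formula hpre) (pv_pairwise formula hpre)]
    rw [pvCat_append]
    simp only [List.nil_append]
    rw [pvCatS_append, pvCatS_filterMap, pvCatS_filterMap]
    simp [pvStd, pvStdB]
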